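-- pv_equiv track=rewrite | github.com/bsgonzalem/Lenguajes-Formales | Automaton.py | fiftyeight
-- ===== SOURCE A (Python) =====
-- def eight(string, i):
--
--     if i >= len(string):
--         return True
--
--     if string[i] == 'a':
--         return eight(string, i + 1)
--
--     if string[i] == 'b':
--         return eight(string, i + 1)
--
--     return False
--
-- def sixtyeight(string, i):
--
--     if i >= len(string):
--         return True
--
--     if string[i] == 'a':
--         return sixtyeight(string, i + 1)
--
--     if string[i] == 'b':
--         return eight(string, i + 1)
--
--     return False
--
-- def fiftyeight(string, i):
--
--     if i >= len(string):
--         return True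
--
--     if string[i] == 'a':
--         return fiftyeight(string, i + 1)
--
--     if string[i] == 'b':
--         return sixtyeight(string, i + 1)
--
--     return False
-- ===== SOURCE B (Python) =====
-- def fiftyeight(string, i):
--     # Single iterative predicate replacing the three mutually recursive
--     # state functions: every char from index i on must be 'a' or 'b'.
--     return all(string[j] in 'ab' for j in range(i, len(string)))
-- ===== Notes on version B (the rewrite author's own statement) =====
-- stated objective: simpler
-- what changed: Collapses the three mutually recursive state functions (which are all behaviourally identical) into one iterative all() over an integer index range; same scan order, so negative-index wraparound and the IndexError boundary are preserved.
import Mathlib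
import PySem

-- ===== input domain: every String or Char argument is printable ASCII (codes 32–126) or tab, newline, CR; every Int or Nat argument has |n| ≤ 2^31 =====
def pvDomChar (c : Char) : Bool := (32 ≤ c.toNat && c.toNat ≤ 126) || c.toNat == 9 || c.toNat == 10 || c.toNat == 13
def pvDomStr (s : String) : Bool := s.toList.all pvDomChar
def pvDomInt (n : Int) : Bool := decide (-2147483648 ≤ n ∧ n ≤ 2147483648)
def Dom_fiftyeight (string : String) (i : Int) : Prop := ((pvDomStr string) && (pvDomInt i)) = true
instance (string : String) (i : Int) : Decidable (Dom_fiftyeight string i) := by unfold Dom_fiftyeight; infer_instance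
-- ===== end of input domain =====

-- B collapses A's three mutually recursive state functions into one iterative all() over
-- an index range (objective: simpler); equivalence is about the return value, A raises
-- (IndexError) exactly outside Pre_.

-- ===== PORT A =====
mutual
-- helper 'eight' of A
def pvA_eight (string : String) (i : Int) : Bool :=
  if _h : (PySem.Str.len string : Int) ≤ i then true
  else
    match PySem.Str.pyGet? string i with
    | some 'a' => pvA_eight string (i + 1)
    | some 'b' => pvA_eight string (i + 1)
    | _ => false   -- none = IndexError (excluded by Pre_); other char = return False
termination_by ((PySem.Str.len string : Int) - i).toNat
decreasing_by all_goals (simp at _h ⊢; omega)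

-- helper 'sixtyeight' of A
def pvA_sixtyeight (string : String) (i : Int) : Bool :=
  if _h : (PySem.Str.len string : Int) ≤ i then true
  else
    match PySem.Str.pyGet? string i with
    | some 'a' => pvA_sixtyeight string (i + 1)
    | some 'b' => pvA_eight string (i + 1)
    | _ => false
termination_by ((PySem.Str.len string : Int) - i).toNat
decreasing_by all_goals (simp at _h ⊢; omega)

def fiftyeight (string : String) (i : Int) : Bool :=
  if _h : (PySem.Str.len string : Int) ≤ i then true
  else
    match PySem.Str.pyGet? string i with
    | some 'a' => fiftyeight string (i + 1)
    | some 'b' => pvA_sixtyeight string (i + 1)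
    | _ => false
termination_by ((PySem.Str.len string : Int) - i).toNat
decreasing_by all_goals (simp at _h ⊢; omega)
end

-- ===== PORT B =====
def fiftyeight_alt (string : String) (i : Int) : Bool :=
  (PySem.List.pyRange i (PySem.Str.len string) 1).all
    (fun j =>
      match PySem.Str.pyGet? string j with   -- string[j] (IndexError excluded by Pre_)
      | some c => c == 'a' || c == 'b'       -- string[j] in 'ab'
      | none => false)

-- ===== PRECONDITION & SPEC =====
-- A raises IndexError exactly when some scanned index is below -len(string),
-- i.e. when i < -len(string) (and i < len(string)); Pre_ excludes precisely those inputs.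
def Pre_fiftyeight (string : String) (i : Int) : Prop :=
  -(PySem.Str.len string : Int) ≤ i
instance (string : String) (i : Int) : Decidable (Pre_fiftyeight string i) := by
  unfold Pre_fiftyeight; infer_instance
def pvWitness_fiftyeight : String × Int := ("ab", 0)

def Spec_fiftyeight (string : String) (i : Int) (out : Bool) : Prop := out = fiftyeight_alt string i
instance (string : String) (i : Int) (out : Bool) : Decidable (Spec_fiftyeight string i out) := by unfold Spec_fiftyeight; infer_instance

-- ===== CLAIM (what is proved, stated in full; the proofs are below) =====
def Claim_equal_fiftyeight : Prop := ∀ (string : String) (i : Int), Dom_fiftyeight string i → Pre_fiftyeight string i → Spec_fiftyeight string i (fiftyeight string i)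

-- ===== LEMMAS AND PROOFS =====

-- one step of B's all() when i is still in range
lemma alt_step (s : String) (i : Int) (h : i < (PySem.Str.len s : Int)) :
    fiftyeight_alt s i =
      ((match PySem.Str.pyGet? s i with
        | some c => c == 'a' || c == 'b'
        | none => false) && fiftyeight_alt s (i + 1)) := by
  unfold fiftyeight_alt
  rw [PySem.List.pyRange_one_cons h]
  simp

lemma alt_done (s : String) (i : Int) (h : (PySem.Str.len s : Int) ≤ i) :
    fiftyeight_alt s i = true := by
  unfold fiftyeight_alt
  rw [PySem.List.pyRange_one_eq_nil h]
  simp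

-- all three of A's state functions compute B's predicate on Pre_
lemma all_eq_alt (s : String) : ∀ (n : Nat) (i : Int),
    ((PySem.Str.len s : Int) - i).toNat = n → -(PySem.Str.len s : Int) ≤ i →
    pvA_eight s i = fiftyeight_alt s i ∧
    pvA_sixtyeight s i = fiftyeight_alt s i ∧
    fiftyeight s i = fiftyeight_alt s i := by
  intro n
  induction n with
  | zero =>
    intro i hn _
    have hle : (PySem.Str.len s : Int) ≤ i := by omega
    have hle' : ((s.length : Int)) ≤ i := by simpa [PySem.Str.len_eq] using hle
    rw [pvA_eight, pvA_sixtyeight, fiftyeight, alt_done s i hle]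
    simp [hle']
  | succ n ih =>
    intro i hn hpre
    have hlt : i < (PySem.Str.len s : Int) := by omega
    have hnot : ¬ (PySem.Str.len s : Int) ≤ i := by omega
    obtain ⟨ih1, ih2, ih3⟩ := ih (i + 1) (by omega) (by omega)
    have hget : ∃ c, PySem.Str.pyGet? s i = some c := by
      rcases hh : PySem.Str.pyGet? s i with _ | c
      · exfalso
        have := (PySem.List.pyGet?_eq_none_iff (xs := s.toList) (i := i)).mp (by
          simpa using hh)
        simp [PySem.Raise.InRange] at this
        simp [PySem.Str.len_eq] at hpre hlt
        omega
      · exact ⟨c, rfl⟩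
    obtain ⟨c, hc⟩ := hget
    rw [pvA_eight, pvA_sixtyeight, fiftyeight, alt_step s i hlt, hc]
    simp only [dif_neg hnot]
    refine ⟨?_, ?_, ?_⟩ <;> (split <;> simp_all)

-- ===== VERDICT (by name: the statement is the Claim_ definition above) =====
theorem fiftyeight_spec : Claim_equal_fiftyeight := by
  intro s i _ hpre
  unfold Spec_fiftyeight
  exact (all_eq_alt s (((PySem.Str.len s : Int) - i).toNat) i rfl hpre).2.2
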